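-- pv_equiv track=rewrite | github.com/daniel-reich/ubiquitous-fiesta | 9CdF5hA7jRARpBwcF_1.py | map_letters
-- ===== SOURCE A (Python) =====
-- def map_letters(word):
--     d = {}
--     for idx, letter in enumerate(word):
--         if letter in d:
--             d[letter].append(idx)
--         else:
--             d[letter] = [idx]
--     return d
-- ===== SOURCE B (Python) =====
-- def map_letters(word):
--     # distinct letters in first-occurrence order, then one full scan per letter
--     return {c: [i for i, ch in enumerate(word) if ch == c] for c in dict.fromkeys(word)}
-- ===== Notes on version B (the rewrite author's own statement) =====
-- stated objective: alternative
-- what changed: B replaces A's single accumulating dict pass with an outer loop over the distinct letters (dict.fromkeys) and an inner full scan of enumerate(word) gathering each letter's indices.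
import Mathlib
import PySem

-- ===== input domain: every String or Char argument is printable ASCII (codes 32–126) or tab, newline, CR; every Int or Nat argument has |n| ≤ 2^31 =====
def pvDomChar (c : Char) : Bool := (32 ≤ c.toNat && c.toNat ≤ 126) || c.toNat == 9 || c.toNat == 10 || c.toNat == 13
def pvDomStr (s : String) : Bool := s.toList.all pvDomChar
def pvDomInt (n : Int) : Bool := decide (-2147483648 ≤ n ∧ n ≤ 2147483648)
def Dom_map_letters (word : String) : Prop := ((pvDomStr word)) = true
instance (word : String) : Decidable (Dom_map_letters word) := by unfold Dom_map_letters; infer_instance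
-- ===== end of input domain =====

-- B builds the dict by one full scan of the word per distinct letter (dict.fromkeys order)
-- instead of A's single accumulating pass; alternative decomposition, return value proved equal.


-- iterating a Python string yields its characters as 1-character strings
def chstr (c : Char) : String := String.ofList [c]

-- ===== PORT A =====
-- A: d = {}; for idx, letter in enumerate(word): if letter in d: d[letter].append(idx) else: d[letter] = [idx]; return d
def map_letters (word : String) : List (String × List Int) :=
  ((PySem.List.enumerate word.toList).foldl
    (fun d (p : Int × Char) =>
      if d.contains (chstr p.2) then d.modify (chstr p.2) [] (· ++ [p.1])  -- d[letter].append(idx)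
      else d.insert (chstr p.2) [p.1])                                     -- d[letter] = [idx]
    PySem.Dict.empty).items

-- ===== PORT B =====
-- B: {c: [i for i, ch in enumerate(word) if ch == c] for c in dict.fromkeys(word)}
def map_letters_alt (word : String) : List (String × List Int) :=
  ((PySem.List.dedup word.toList).foldl
    (fun d c => d.insert (chstr c)
      (((PySem.List.enumerate word.toList).filter (fun p => p.2 == c)).map (·.1)))
    PySem.Dict.empty).items

-- ===== PRECONDITION & SPEC =====
def Spec_map_letters (word : String) (out : List (String × List Int)) : Prop := out = map_letters_alt word
instance (word : String) (out : List (String × List Int)) : Decidable (Spec_map_letters word out) := by unfold Spec_map_letters; infer_instance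

-- ===== CLAIM (what is proved, stated in full; the proofs are below) =====
def Claim_equal_map_letters : Prop := ∀ (word : String), Dom_map_letters word → Spec_map_letters word (map_letters word)

-- ===== LEMMAS AND PROOFS =====

theorem chstr_injective : Function.Injective chstr := by
  intro a b h
  have := congrArg String.toList h
  simpa [chstr] using this

-- A's if/in/append-else-set step is exactly a dict modify
theorem stepA_eq_modify (d : PySem.Dict String (List Int)) (p : Int × Char) :
    (if d.contains (chstr p.2) then d.modify (chstr p.2) [] (· ++ [p.1])
     else d.insert (chstr p.2) [p.1]) = d.modify (chstr p.2) [] (· ++ [p.1]) := by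
  by_cases h : d.contains (chstr p.2) = true
  · simp [h]
  · simp only [Bool.not_eq_true] at h
    simp only [h, if_neg Bool.false_ne_true]
    simp [PySem.Dict.modify, PySem.Dict.getD, PySem.Dict.get?, PySem.Dict.contains] at *
    rw [List.find?_eq_none.mpr]
    · rfl
    · rintro ⟨a, b⟩ hm
      simpa using fun e => h a b hm e

theorem discard_map {α β : Type} [DecidableEq α] [DecidableEq β] (f : α → β)
    (hf : Function.Injective f) (s : List α) (x : α) :
    PySem.Set.discard (s.map f) (f x) = (PySem.Set.discard s x).map f := by
  simp only [PySem.Set.discard, List.filter_map]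
  congr 1
  apply List.filter_congr
  intro a _
  simp [hf.eq_iff]

theorem dedup_map {α β : Type} [DecidableEq α] [DecidableEq β] (f : α → β)
    (hf : Function.Injective f) (xs : List α) :
    PySem.List.dedup (xs.map f) = (PySem.List.dedup xs).map f := by
  induction xs with
  | nil => rfl
  | cons x xs ih =>
    simp only [List.map_cons, PySem.List.dedup_eq_ofList, PySem.Set.ofList_cons] at *
    rw [ih, discard_map f hf]

-- ===== VERDICT (by name: the statement is the Claim_ definition above) =====
theorem map_letters_spec : Claim_equal_map_letters := by
  intro word _
  unfold Spec_map_letters map_letters map_letters_alt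
  set wl := word.toList with hwl
  set l := PySem.List.enumerate wl with hl
  -- A's fold is a modify fold
  have hA : l.foldl
      (fun d (p : Int × Char) =>
        if d.contains (chstr p.2) then d.modify (chstr p.2) [] (· ++ [p.1])
        else d.insert (chstr p.2) [p.1]) PySem.Dict.empty
      = l.foldl (fun d p => d.modify (chstr p.2) [] (· ++ [p.1])) PySem.Dict.empty := by
    exact PySem.List.foldl_congr_mem _ _ _ _ (fun d p _ => stepA_eq_modify d p)
  rw [hA]
  set D := l.foldl (fun d p => d.modify (chstr p.2) [] (· ++ [p.1])) PySem.Dict.empty with hD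
  -- keys of D
  have hnodup : D.keys.Nodup := by
    rw [hD]
    exact PySem.Dict.nodup_keys_foldl_modify_key l (fun p => chstr p.2) [] _ _
      PySem.Dict.nodup_keys_empty
  have hkeys : D.keys = (PySem.List.dedup wl).map chstr := by
    rw [hD, PySem.Dict.keys_foldl_modify_key]
    rw [PySem.Dict.keys_empty, PySem.Set.update_nil_left]
    have : l.map (fun p => chstr p.2) = (l.map (·.2)).map chstr := by
      simp [List.map_map, Function.comp]
    rw [this, PySem.List.map_snd_enumerate, ← PySem.List.dedup_eq_ofList,
      dedup_map chstr chstr_injective]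
  -- value of D at each letter
  have hval : ∀ c : Char, D.getD (chstr c) [] = (l.filter (fun p => p.2 == c)).map (·.1) := by
    intro c
    have hfold : D = (l.map (fun p => (chstr p.2, p.1))).foldl
        (fun d q => d.modify q.1 [] (· ++ [q.2])) PySem.Dict.empty := by
      rw [hD, List.foldl_map]
    rw [hfold, PySem.Dict.getD_foldl_modify_append, PySem.Dict.getD_empty]
    rw [List.filter_map]
    have hflt : l.filter ((fun q => q.1 == chstr c) ∘ (fun p => (chstr p.2, p.1)))
        = l.filter (fun p => p.2 == c) := by
      apply List.filter_congr
      intro p _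
      simp [Function.comp, chstr_injective.eq_iff]
    rw [hflt]
    simp [List.map_map, Function.comp]
  -- A's items
  rw [PySem.Dict.items_eq_map_keys D hnodup [], hkeys]
  -- B's items
  rw [PySem.Dict.items_foldl_insert_fresh (PySem.List.dedup wl) chstr
      (fun c => ((PySem.List.enumerate wl).filter (fun p => p.2 == c)).map (·.1))
      PySem.Dict.empty
      (by intro a _; exact PySem.Dict.contains_empty _)
      ((PySem.List.nodup_dedup wl).map chstr_injective)]
  simp only [PySem.Dict.empty, List.nil_append, List.map_map]
  apply List.map_congr_left
  intro c _
  simp [Function.comp, hval c]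
  rfl
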